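-- pv_equiv track=rewrite | github.com/coreyt429/AdventOfCode | 2021/18/solution.py | can_explode
-- ===== SOURCE A (Python) =====
-- def can_explode(string):
--     """Function to identify the exploding pair if any"""
--     max_depth = 0
--     depth = 0
--     for idx, char in enumerate(string):
--         if char == "[":
--             depth += 1
--             max_depth = max(depth, max_depth)
--             if max_depth > 4:
--                 return True, idx
--             continue
--         if char == "]":
--             depth -= 1
--     return False, 0
-- ===== SOURCE B (Python) =====
-- def can_explode(string):
--     """Function to identify the exploding pair if any"""
--     depths = []
--     d = 0
--     for ch in string:
--         d += (ch == "[") - (ch == "]")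
--         depths.append(d)
--     for idx, d in enumerate(depths):
--         if d > 4:
--             return True, idx
--     return False, 0
-- ===== Notes on version B (the rewrite author's own statement) =====
-- stated objective: alternative
-- what changed: Replaces the early-exit counter loop (with a running max_depth) by building the full running-depth table first and then searching it for the first entry exceeding 4.
import Mathlib
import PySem

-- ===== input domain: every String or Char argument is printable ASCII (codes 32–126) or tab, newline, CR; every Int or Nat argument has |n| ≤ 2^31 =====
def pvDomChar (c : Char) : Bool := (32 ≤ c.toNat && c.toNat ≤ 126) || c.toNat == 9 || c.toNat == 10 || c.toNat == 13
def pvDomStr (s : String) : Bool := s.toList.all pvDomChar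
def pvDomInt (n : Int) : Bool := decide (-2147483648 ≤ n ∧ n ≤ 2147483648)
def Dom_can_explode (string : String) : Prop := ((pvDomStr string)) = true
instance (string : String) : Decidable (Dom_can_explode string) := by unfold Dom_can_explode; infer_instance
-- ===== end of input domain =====

-- B builds the full running-depth table first and then searches it, instead of A's early-exit counter loop with a running max.

-- ===== PORT A =====
-- the enumerate loop, carrying idx, depth and max_depth
def canExplodeLoopA : List Char → Nat → Int → Int → Bool × Int
  | [], _, _, _ => (false, 0)
  | c :: rest, idx, depth, maxDepth =>
    if c = '[' then
      let depth' := depth + 1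
      let maxDepth' := max depth' maxDepth
      if maxDepth' > 4 then (true, (idx : Int))
      else canExplodeLoopA rest (idx + 1) depth' maxDepth'
    else if c = ']' then canExplodeLoopA rest (idx + 1) (depth - 1) maxDepth
    else canExplodeLoopA rest (idx + 1) depth maxDepth

def can_explode (string : String) : Bool × Int :=
  canExplodeLoopA string.toList 0 0 0

-- ===== PORT B =====
-- first loop of Source B: the running-depth table
def altDepths : List Char → Int → List Int
  | [], _ => []
  | c :: rest, d =>
    let d' := d + (if c = '[' then 1 else 0) - (if c = ']' then 1 else 0)
    d' :: altDepths rest d'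

-- second loop of Source B: enumerate the table and find the first depth > 4
def altFind : List Int → Nat → Bool × Int
  | [], _ => (false, 0)
  | d :: rest, idx => if d > 4 then (true, (idx : Int)) else altFind rest (idx + 1)

def can_explode_alt (string : String) : Bool × Int :=
  altFind (altDepths string.toList 0) 0

-- ===== PRECONDITION & SPEC =====
def Spec_can_explode (string : String) (out : Bool × Int) : Prop := out = can_explode_alt string
instance (string : String) (out : Bool × Int) : Decidable (Spec_can_explode string out) := by unfold Spec_can_explode; infer_instance

-- ===== CLAIM (what is proved, stated in full; the proofs are below) =====
def Claim_equal_can_explode : Prop := ∀ (string : String), Dom_can_explode string → Spec_can_explode string (can_explode string)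

-- ===== LEMMAS AND PROOFS =====
-- loop invariant: with depth ≤ 4 and max_depth ≤ 4, A's loop equals B's search of the depth table
lemma canExplode_loop_eq (l : List Char) :
    ∀ (idx : Nat) (depth maxDepth : Int), depth ≤ 4 → maxDepth ≤ 4 →
      canExplodeLoopA l idx depth maxDepth = altFind (altDepths l depth) idx := by
  induction l with
  | nil => intro idx depth maxDepth _ _; simp [canExplodeLoopA, altDepths, altFind]
  | cons c rest ih =>
    intro idx depth maxDepth hd hm
    by_cases hb : c = '['
    · subst hb
      simp only [canExplodeLoopA, altDepths, altFind, reduceIte,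
        if_neg (show ¬('[' : Char) = ']' by decide), sub_zero]
      split_ifs with h1 h2 <;> first
        | rfl
        | omega
        | rw [ih (idx + 1) (depth + 1) (max (depth + 1) maxDepth) (by omega) (by omega)]
    · by_cases hc : c = ']'
      · subst hc
        simp only [canExplodeLoopA, altDepths, altFind, reduceIte, if_neg hb, add_zero]
        split_ifs with h1 <;> first
          | omega
          | rw [ih (idx + 1) (depth - 1) maxDepth (by omega) hm]
      · simp only [canExplodeLoopA, altDepths, altFind, if_neg hb, if_neg hc, sub_zero, add_zero]
        split_ifs with h1 <;> first
          | omega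
          | rw [ih (idx + 1) depth maxDepth hd hm]

-- ===== VERDICT (by name: the statement is the Claim_ definition above) =====
theorem can_explode_spec : Claim_equal_can_explode := by
  intro string _
  unfold Spec_can_explode can_explode can_explode_alt
  exact canExplode_loop_eq string.toList 0 0 0 (by norm_num) (by norm_num)
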